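-- pv_equiv track=rewrite | github.com/freedomcondor/mns3.0 | src/scripts/drawData.py | transferTimeDataToBoxData
-- ===== SOURCE A (Python) =====
-- def transferTimeDataToBoxData(robotsData, step_length = 50, interval_steps = False) :
-- 	boxdata = []
-- 	positions = []
-- 	robot_count = 0
-- 	# for each robot
-- 	for robotData in robotsData :
-- 		box_count = 0
-- 		# for each step of this robot
-- 		for i in range(0, len(robotData)) :
-- 			# if a right step
-- 			if i % step_length == 0 :
-- 				#if robot_count == 0 :
-- 				if len(boxdata) <= box_count:
-- 					boxdata.append([])
-- 					positions.append(i)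
-- 				boxdata[box_count].append(robotData[i])
-- 				box_count = box_count + 1
-- 			# if count interval steps
-- 			if interval_steps == True:
-- 				boxdata[box_count-1].append(robotData[i])
--
--
-- 		robot_count = robot_count + 1
--
-- 	return boxdata, positions
-- ===== SOURCE B (Python) =====
-- def transferTimeDataToBoxData(robotsData, step_length = 50, interval_steps = False) :
-- 	boxdata = []
-- 	positions = []
-- 	# chunk-indexed loop: one iteration per box instead of per step
-- 	for robotData in robotsData :
-- 		for b, start in enumerate(range(0, len(robotData), step_length)) :
-- 			if b == len(boxdata) :
-- 				boxdata.append([])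
-- 				positions.append(start)
-- 			boxdata[b].append(robotData[start])
-- 			if interval_steps :
-- 				boxdata[b].extend(robotData[start:start+step_length])
-- 	return boxdata, positions
-- ===== Notes on version B (the rewrite author's own statement) =====
-- stated objective: faster
-- what changed: Replaces A's per-step loop with a modulo test on every index by a chunk-indexed loop over range(0, len, step_length) that appends the boundary element and, for interval mode, extends with one slice per chunk, so per-element interpreted work is replaced by one C-level slice/extend per chunk.
-- outside the precondition, e.g. on transferTimeDataToBoxData([[1, 2, 3]], -2, False): A returns ([[1], [3]], [0, 2]), B returns ([], [])
import Mathlib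
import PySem

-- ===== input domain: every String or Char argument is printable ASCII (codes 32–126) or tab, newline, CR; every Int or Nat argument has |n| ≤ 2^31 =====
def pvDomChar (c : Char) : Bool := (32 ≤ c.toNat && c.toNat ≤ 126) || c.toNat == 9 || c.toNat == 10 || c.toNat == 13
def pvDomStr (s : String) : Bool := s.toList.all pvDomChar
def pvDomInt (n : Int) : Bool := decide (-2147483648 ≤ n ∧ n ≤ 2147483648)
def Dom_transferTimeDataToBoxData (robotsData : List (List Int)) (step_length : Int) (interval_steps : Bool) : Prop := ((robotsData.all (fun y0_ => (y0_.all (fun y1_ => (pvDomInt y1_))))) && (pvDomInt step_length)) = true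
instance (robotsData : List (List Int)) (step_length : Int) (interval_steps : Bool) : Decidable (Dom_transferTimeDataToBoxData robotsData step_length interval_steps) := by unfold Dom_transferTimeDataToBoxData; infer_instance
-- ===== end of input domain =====

-- B replaces A's per-step modulo-filtered loop by a chunk-indexed loop with one slice/extend per box (measured constant-factor speedup, same values).

-- ===== PORT A =====
-- boxdata[k].append(x): read-modify-write at index k (every index A reaches is in range)
def pvAppendAt (bd : List (List Int)) (k : Int) (x : Int) : List (List Int) :=
  PySem.List.pySetD bd k (PySem.List.pyGetD bd k [] ++ [x])

-- the body of A's inner 'for i in range(0, len(robotData))' loop; state = (boxdata, positions, box_count)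
def pvBodyA (step : Int) (iv : Bool) (rd : List Int) (s : List (List Int) × List Int × Int) (i : Int) :
    List (List Int) × List Int × Int :=
  let t : List (List Int) × List Int × Int :=
    if PySem.Int.mod i step = 0 then
      let bd2 := if PySem.List.len s.1 ≤ s.2.2 then s.1 ++ [[]] else s.1
      let pos2 := if PySem.List.len s.1 ≤ s.2.2 then s.2.1 ++ [i] else s.2.1
      (pvAppendAt bd2 s.2.2 (PySem.List.pyGetD rd i 0), pos2, s.2.2 + 1)
    else s
  if iv = true then
    (pvAppendAt t.1 (t.2.2 - 1) (PySem.List.pyGetD rd i 0), t.2.1, t.2.2)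
  else t

def pvInnerA (step : Int) (iv : Bool) (rd : List Int) (st : List (List Int) × List Int) :
    List (List Int) × List Int :=
  let r := (PySem.List.pyRange 0 (PySem.List.len rd) 1).foldl (pvBodyA step iv rd) (st.1, st.2, 0)
  (r.1, r.2.1)

def transferTimeDataToBoxData (robotsData : List (List Int)) (step_length : Int) (interval_steps : Bool) : List (List Int) × List Int :=
  robotsData.foldl (fun st rd => pvInnerA step_length interval_steps rd st) ([], [])

-- ===== PORT B =====
-- boxdata[k].extend(xs)
def pvExtendAt (bd : List (List Int)) (k : Int) (xs : List Int) : List (List Int) :=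
  PySem.List.pySetD bd k (PySem.List.pyGetD bd k [] ++ xs)

-- the body of B's 'for b, start in enumerate(range(0, len(robotData), step_length))' loop; state = (boxdata, positions)
def pvBodyB (step : Int) (iv : Bool) (rd : List Int) (s : List (List Int) × List Int) (p : Int × Int) :
    List (List Int) × List Int :=
  let bd := if p.1 = PySem.List.len s.1 then s.1 ++ [[]] else s.1
  let pos := if p.1 = PySem.List.len s.1 then s.2 ++ [p.2] else s.2
  let bd := pvAppendAt bd p.1 (PySem.List.pyGetD rd p.2 0)
  let bd := if iv = true then
      pvExtendAt bd p.1 (PySem.List.slice rd (some p.2) (some (p.2 + step)))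
    else bd
  (bd, pos)

def pvInnerB (step : Int) (iv : Bool) (rd : List Int) (st : List (List Int) × List Int) :
    List (List Int) × List Int :=
  (PySem.List.enumerate (PySem.List.pyRange 0 (PySem.List.len rd) step) 0).foldl
    (pvBodyB step iv rd) st

def transferTimeDataToBoxData_alt (robotsData : List (List Int)) (step_length : Int) (interval_steps : Bool) : List (List Int) × List Int :=
  robotsData.foldl (fun st rd => pvInnerB step_length interval_steps rd st) ([], [])

-- ===== PRECONDITION & SPEC =====
-- Pre_ restricts to the natural domain of a positive step length: with step_length = 0 A raises
-- ZeroDivisionError on any nonempty robot, and a negative step length is a malformed input on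
-- which A's modulo test accidentally behaves like |step_length| while B's range yields no chunks.
def Pre_transferTimeDataToBoxData (robotsData : List (List Int)) (step_length : Int) (interval_steps : Bool) : Prop :=
  1 ≤ step_length
instance (robotsData : List (List Int)) (step_length : Int) (interval_steps : Bool) : Decidable (Pre_transferTimeDataToBoxData robotsData step_length interval_steps) := by unfold Pre_transferTimeDataToBoxData; infer_instance

def pvWitness_transferTimeDataToBoxData : List (List Int) × Int × Bool := ([[1, 2, 3, 4, 5], [10, 20, 30]], 2, true)

def Spec_transferTimeDataToBoxData (robotsData : List (List Int)) (step_length : Int) (interval_steps : Bool) (out : List (List Int) × List Int) : Prop := out = transferTimeDataToBoxData_alt robotsData step_length interval_steps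
instance (robotsData : List (List Int)) (step_length : Int) (interval_steps : Bool) (out : List (List Int) × List Int) : Decidable (Spec_transferTimeDataToBoxData robotsData step_length interval_steps out) := by unfold Spec_transferTimeDataToBoxData; infer_instance

-- ===== CLAIM (what is proved, stated in full; the proofs are below) =====
def Claim_equal_transferTimeDataToBoxData : Prop := ∀ (robotsData : List (List Int)) (step_length : Int) (interval_steps : Bool), Dom_transferTimeDataToBoxData robotsData step_length interval_steps → Pre_transferTimeDataToBoxData robotsData step_length interval_steps → Spec_transferTimeDataToBoxData robotsData step_length interval_steps (transferTimeDataToBoxData robotsData step_length interval_steps)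

-- ===== LEMMAS AND PROOFS =====

theorem pv_pyRange_pos_nil (a b s : Int) (hs : 0 < s) (hab : b ≤ a) :
    PySem.List.pyRange a b s = [] := by
  simp only [PySem.List.pyRange]
  rw [if_neg (by omega : ¬ s = 0)]
  simp only [if_pos hs, if_neg (by omega : ¬ a < b)]
  simp

theorem pv_pyRange_pos_cons (a b s : Int) (hs : 0 < s) (hab : a < b) :
    PySem.List.pyRange a b s = a :: PySem.List.pyRange (a + s) b s := by
  by_cases h2 : a + s < b
  · have key : (b - a + s - 1) / s = (b - (a + s) + s - 1) / s + 1 := by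
      have h3 : b - a + s - 1 = (b - (a + s) + s - 1) + 1 * s := by ring
      rw [h3, Int.add_mul_ediv_right _ _ (by omega : s ≠ 0)]
    have hx : 0 ≤ (b - (a + s) + s - 1) / s := Int.ediv_nonneg (by omega) (by omega)
    simp only [PySem.List.pyRange]
    rw [if_neg (by omega : ¬ s = 0), if_neg (by omega : ¬ s = 0)]
    simp only [if_pos hs, if_pos hab, if_pos h2]
    rw [key]
    have h4 : ((b - (a + s) + s - 1) / s + 1).toNat = ((b - (a + s) + s - 1) / s).toNat + 1 := by omega
    rw [h4, List.range_succ_eq_map]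
    simp [List.map_map, Function.comp_def, mul_add]
    intro k _
    ring
  · have h1 : (b - a + s - 1) / s = 1 := by
      have h5 := PySem.Int.floordiv_eq_ediv_of_pos (a := b - a + s - 1) (b := s) hs
      rw [← h5, PySem.Int.floordiv_eq_iff_of_pos hs]
      constructor <;> omega
    rw [pv_pyRange_pos_nil (a+s) b s hs (by omega)]
    simp only [PySem.List.pyRange]
    rw [if_neg (by omega : ¬ s = 0)]
    simp only [if_pos hs, if_pos hab, h1]
    simp

theorem pv_extend_nil (bd : List (List Int)) (b : Nat) :
    pvExtendAt bd (b : Int) [] = bd := by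
  simp only [pvExtendAt, PySem.List.pySetD_natCast, PySem.List.pyGetD_natCast, List.append_nil]
  by_cases hb : b < bd.length
  · rw [List.getD_eq_getElem _ _ hb, List.set_getElem_self]
  · rw [List.set_eq_of_length_le (by omega)]

theorem pv_extend_extend (bd : List (List Int)) (b : Nat) (ys zs : List Int) :
    pvExtendAt (pvExtendAt bd (b : Int) ys) (b : Int) zs = pvExtendAt bd (b : Int) (ys ++ zs) := by
  simp only [pvExtendAt, PySem.List.pySetD_natCast, PySem.List.pyGetD_natCast]
  by_cases hb : b < bd.length
  · rw [List.getD_eq_getElem _ _ hb,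
        List.getD_eq_getElem _ _ (by simpa using hb)]
    simp [List.getElem_set_self, List.set_set]
  · rw [List.set_eq_of_length_le (by simp; omega)]
    rw [List.set_eq_of_length_le (by omega), List.set_eq_of_length_le (by omega)]

theorem pv_foldl_appendAt (b : Nat) (l : List Int) : ∀ (bd : List (List Int)),
    l.foldl (fun acc x => pvAppendAt acc (b : Int) x) bd = pvExtendAt bd (b : Int) l := by
  induction l with
  | nil => intro bd; exact (pv_extend_nil bd b).symm
  | cons x t ih =>
      intro bd
      simp only [List.foldl_cons]
      rw [ih (pvAppendAt bd (b : Int) x)]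
      show pvExtendAt (pvExtendAt bd (b : Int) [x]) (b : Int) t = _
      rw [pv_extend_extend]
      rfl

theorem pv_map_pyGetD_range (rd : List Int) (a m : Nat) (hm : m ≤ rd.length) :
    (PySem.List.pyRange (a : Int) (m : Int) 1).map (fun i => PySem.List.pyGetD rd i 0)
      = (rd.drop a).take (m - a) := by
  apply List.ext_getElem
  · simp [PySem.List.length_pyRange_one]
    omega
  · intro k h1 h2
    simp only [List.getElem_map, PySem.List.getElem_pyRange_one]
    have hk : k < m - a := by
      have := h2; simp at this; omega
    have hik : ((a : Int) + k) = ((a + k : Nat) : Int) := by push_cast; ring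
    rw [hik, PySem.List.pyGetD_natCast]
    rw [List.getD_eq_getElem _ _ (by omega)]
    simp [List.getElem_take, List.getElem_drop]

theorem pv_slice_map (rd : List Int) (s0 step : Int) (h0 : 0 ≤ s0) (hst : 0 < step) :
    PySem.List.slice rd (some s0) (some (s0 + step))
      = (PySem.List.pyRange s0 (min (s0 + step) (rd.length : Int)) 1).map
          (fun i => PySem.List.pyGetD rd i 0) := by
  obtain ⟨a, rfl⟩ : ∃ a : Nat, ((a : Nat) : Int) = s0 := ⟨s0.toNat, by omega⟩
  obtain ⟨m, hm⟩ : ∃ m : Nat, ((m : Nat) : Int) = min ((a : Int) + step) (rd.length : Int) :=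
    ⟨(min ((a : Int) + step) (rd.length : Int)).toNat, by omega⟩
  rw [PySem.List.slice_toNat rd h0 (by omega), ← hm, pv_map_pyGetD_range rd a m (by omega)]
  by_cases h : (a : Int) + step ≤ (rd.length : Int)
  · congr 1
    omega
  · have h1 : m = rd.length := by omega
    subst h1
    rw [List.take_of_length_le (by simp; omega), List.take_of_length_le (by simp)]
    simp

theorem pv_nb_fold (step : Int) (iv : Bool) (rd : List Int) (c : Int) (pos : List Int)
    (l : List Int) : ∀ (bd : List (List Int)),
    (∀ i ∈ l, ¬ PySem.Int.mod i step = 0) →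
    l.foldl (pvBodyA step iv rd) (bd, pos, c)
      = (l.foldl (fun acc i => if iv = true then pvAppendAt acc (c - 1) (PySem.List.pyGetD rd i 0) else acc) bd, pos, c) := by
  induction l with
  | nil => intro bd _; rfl
  | cons i t ih =>
      intro bd h
      simp only [List.foldl_cons]
      have hbody : pvBodyA step iv rd (bd, pos, c) i
          = (if iv = true then pvAppendAt bd (c - 1) (PySem.List.pyGetD rd i 0) else bd, pos, c) := by
        simp only [pvBodyA, if_neg (h i (List.mem_cons_self))]
        cases iv <;> simp
      rw [hbody]
      by_cases hiv : iv = true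
      · rw [if_pos hiv]
        exact ih _ (fun j hj => h j (List.mem_cons_of_mem _ hj))
      · rw [if_neg hiv]
        exact ih _ (fun j hj => h j (List.mem_cons_of_mem _ hj))

theorem pv_chunks (step : Int) (hs : 1 ≤ step) (iv : Bool) (rd : List Int)
    (fuel : Nat) : ∀ (b : Nat) (bd : List (List Int)) (pos : List Int),
    b ≤ bd.length →
    (rd.length : Int) ≤ (b : Int) * step + (fuel : Int) * step →
    (((PySem.List.pyRange ((b : Int) * step) (rd.length : Int) 1).foldl (pvBodyA step iv rd) (bd, pos, (b : Int))).1,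
      ((PySem.List.pyRange ((b : Int) * step) (rd.length : Int) 1).foldl (pvBodyA step iv rd) (bd, pos, (b : Int))).2.1)
      = (PySem.List.enumerate (PySem.List.pyRange ((b : Int) * step) (rd.length : Int) step) (b : Int)).foldl
          (pvBodyB step iv rd) (bd, pos) := by
  induction fuel with
  | zero =>
      intro b bd pos hb hf
      rw [PySem.List.pyRange_one_eq_nil (by simpa using hf),
          pv_pyRange_pos_nil _ _ _ (by omega) (by simpa using hf)]
      rfl
  | succ fuel ih =>
      intro b bd pos hb hf
      by_cases hn : (rd.length : Int) ≤ (b : Int) * step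
      · rw [PySem.List.pyRange_one_eq_nil hn, pv_pyRange_pos_nil _ _ _ (by omega) hn]
        rfl
      · have hlt : (b : Int) * step < (rd.length : Int) := by omega
        have hs0 : 0 ≤ (b : Int) * step := by positivity
        -- abbreviations
        set n : Int := (rd.length : Int) with hn_def
        set s0 : Int := (b : Int) * step with hs0_def
        set m : Int := min (s0 + step) n with hm_def
        set bd2 : List (List Int) := if PySem.List.len bd ≤ (b : Int) then bd ++ [[]] else bd with hbd2_def
        set pos2 : List Int := if PySem.List.len bd ≤ (b : Int) then pos ++ [s0] else pos with hpos2_def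
        have hb2 : b + 1 ≤ bd2.length := by
          rw [hbd2_def]
          by_cases hc : bd.length = b
          · rw [if_pos (by simp [hc])]
            simp [hc]
          · rw [if_neg (by simp; omega)]
            omega
        -- RHS: peel one chunk
        rw [pv_pyRange_pos_cons s0 n step (by omega) hlt, PySem.List.enumerate_cons,
            List.foldl_cons]
        have hBbody : pvBodyB step iv rd (bd, pos) ((b : Int), s0)
            = (if iv = true then
                 pvExtendAt (pvAppendAt bd2 ((b : Int)) (PySem.List.pyGetD rd s0 0)) ((b : Int))
                   (PySem.List.slice rd (some s0) (some (s0 + step)))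
               else pvAppendAt bd2 ((b : Int)) (PySem.List.pyGetD rd s0 0), pos2) := by
          have hiff : ((b : Int) = PySem.List.len bd) ↔ (PySem.List.len bd ≤ (b : Int)) := by
            simp only [PySem.List.len_eq]
            omega
          simp only [pvBodyB, hiff, hbd2_def, hpos2_def]
        rw [hBbody]
        -- LHS: split the unit range at m
        rw [PySem.List.pyRange_one_append s0 m n (by omega) (by omega), List.foldl_append,
            PySem.List.pyRange_one_cons (show s0 < m by omega), List.foldl_cons]
        have hmod : PySem.Int.mod s0 step = 0 :=
          (PySem.Int.mod_eq_zero_iff_dvd _ _).2 (dvd_mul_left step (b : Int))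
        have hAbody : pvBodyA step iv rd (bd, pos, (b : Int)) s0
            = (if iv = true then pvAppendAt (pvAppendAt bd2 ((b : Int)) (PySem.List.pyGetD rd s0 0)) ((b : Int)) (PySem.List.pyGetD rd s0 0)
               else pvAppendAt bd2 ((b : Int)) (PySem.List.pyGetD rd s0 0), pos2, (b : Int) + 1) := by
          simp only [pvBodyA, hmod, hbd2_def, hpos2_def]
          cases iv <;> simp
        rw [hAbody]
        -- non-boundary part of the chunk
        have hnotmod : ∀ i ∈ PySem.List.pyRange (s0 + 1) m 1, ¬ PySem.Int.mod i step = 0 := by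
          intro i hi hmod0
          rw [PySem.List.mem_pyRange_one] at hi
          have hdvd2 : step ∣ (i - s0) :=
            Int.dvd_sub ((PySem.Int.mod_eq_zero_iff_dvd _ _).1 hmod0) (dvd_mul_left step (b : Int))
          have hle := Int.le_of_dvd (by omega) hdvd2
          have him : i < s0 + step := by omega
          omega
        rw [pv_nb_fold step iv rd ((b : Int) + 1) pos2 _ _ hnotmod]
        simp only [add_sub_cancel_right]
        have hlen : ∀ (acc : List (List Int)) (l : List Int),
            (if iv = true then pvExtendAt (pvAppendAt acc ((b:Int)) (PySem.List.pyGetD rd s0 0)) ((b:Int)) l else pvAppendAt acc ((b:Int)) (PySem.List.pyGetD rd s0 0)).length = acc.length := by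
          intro acc l
          cases iv <;> simp [pvExtendAt, pvAppendAt]
        have hF : (PySem.List.pyRange (s0 + 1) m 1).foldl
              (fun acc i => if iv = true then pvAppendAt acc ((b : Int)) (PySem.List.pyGetD rd i 0) else acc)
              (if iv = true then pvAppendAt (pvAppendAt bd2 ((b : Int)) (PySem.List.pyGetD rd s0 0)) ((b : Int)) (PySem.List.pyGetD rd s0 0)
               else pvAppendAt bd2 ((b : Int)) (PySem.List.pyGetD rd s0 0))
            = (if iv = true then
                 pvExtendAt (pvAppendAt bd2 ((b : Int)) (PySem.List.pyGetD rd s0 0)) ((b : Int))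
                   (PySem.List.slice rd (some s0) (some (s0 + step)))
               else pvAppendAt bd2 ((b : Int)) (PySem.List.pyGetD rd s0 0)) := by
          by_cases hiv : iv = true
          · simp only [if_pos hiv]
            have h1 : (PySem.List.pyRange (s0 + 1) m 1).foldl
                  (fun acc i => pvAppendAt acc ((b : Int)) (PySem.List.pyGetD rd i 0))
                  (pvAppendAt (pvAppendAt bd2 ((b : Int)) (PySem.List.pyGetD rd s0 0)) ((b : Int)) (PySem.List.pyGetD rd s0 0))
                = (PySem.List.pyRange s0 m 1).foldl
                  (fun acc i => pvAppendAt acc ((b : Int)) (PySem.List.pyGetD rd i 0))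
                  (pvAppendAt bd2 ((b : Int)) (PySem.List.pyGetD rd s0 0)) := by
              rw [PySem.List.pyRange_one_cons (show s0 < m by omega), List.foldl_cons]
            rw [h1, ← List.foldl_map (f := fun i => PySem.List.pyGetD rd i 0)
                  (g := fun acc y => pvAppendAt acc ((b : Int)) y),
                pv_foldl_appendAt b _ _, ← pv_slice_map rd s0 step hs0 (by omega)]
          · simp only [if_neg hiv, List.foldl_fixed]
        rw [hF]
        -- tail: remaining chunks via the induction hypothesis
        have hcast : ((b : Int) + 1) = (((b + 1 : Nat)) : Int) := by push_cast; ring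
        have hms : (((b + 1 : Nat)) : Int) * step = s0 + step := by push_cast; ring
        have hr : PySem.List.pyRange m n 1 = PySem.List.pyRange ((((b + 1 : Nat)) : Int) * step) n 1 := by
          rw [hms]
          by_cases hmn : s0 + step ≤ n
          · congr 1
            omega
          · rw [PySem.List.pyRange_one_eq_nil (by omega), PySem.List.pyRange_one_eq_nil (by omega)]
        rw [hr, hcast, ← hms]
        apply ih (b + 1)
        · rw [hlen]
          exact hb2
        · have hring : (((b + 1 : Nat)) : Int) * step + (fuel : Int) * step
              = (b : Int) * step + (((fuel + 1 : Nat)) : Int) * step := by push_cast; ring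
          rw [hring]
          exact hf


theorem pv_inner_eq (step : Int) (hs : 1 ≤ step) (iv : Bool) (rd : List Int)
    (st : List (List Int) × List Int) :
    pvInnerA step iv rd st = pvInnerB step iv rd st := by
  have h := pv_chunks step hs iv rd rd.length 0 st.1 st.2 (by omega)
    (by push_cast; nlinarith [rd.length.cast_nonneg (α := Int)])
  simp only [Nat.cast_zero, zero_mul] at h
  simp only [pvInnerA, pvInnerB, PySem.List.len_eq]
  rw [h]

-- ===== VERDICT (by name: the statement is the Claim_ definition above) =====
theorem transferTimeDataToBoxData_spec : Claim_equal_transferTimeDataToBoxData := by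
  intro robotsData step_length interval_steps _ hpre
  unfold Spec_transferTimeDataToBoxData transferTimeDataToBoxData transferTimeDataToBoxData_alt
  have h : ∀ (l : List (List Int)) (st : List (List Int) × List Int),
      l.foldl (fun st rd => pvInnerA step_length interval_steps rd st) st
        = l.foldl (fun st rd => pvInnerB step_length interval_steps rd st) st := by
    intro l
    induction l with
    | nil => intro st; rfl
    | cons rd rs ih =>
        intro st
        simp only [List.foldl_cons]
        rw [pv_inner_eq step_length hpre interval_steps rd st]
        exact ih _
  exact h robotsData ([], [])
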